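-- pv_equiv track=rewrite | github.com/Peteous/Twitter-Bot | ReadData.py | getCriteria
-- ===== SOURCE A (Python) =====
-- def getCriteria(text):
-- 	equals = False
-- 	code = ''
-- 	for index in range(len(text)):
-- 		if text[index] == '"' and not equals == True:
-- 			equals = True
-- 		elif equals == True and not text[index] == '"':
-- 			code += text[index]
-- 	return code.rstrip()
-- ===== SOURCE B (Python) =====
-- def getCriteria(text):
--     parts = text.split('"')
--     return ''.join(parts[1:]).rstrip()
-- ===== Notes on version B (the rewrite author's own statement) =====
-- stated objective: simpler
-- what changed: Replaces A's per-character boolean state-machine loop (with repeated string concatenation) by a staged split/join pipeline: split the text on the double-quote character, join all pieces after the first, rstrip the result.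
import Mathlib
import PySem

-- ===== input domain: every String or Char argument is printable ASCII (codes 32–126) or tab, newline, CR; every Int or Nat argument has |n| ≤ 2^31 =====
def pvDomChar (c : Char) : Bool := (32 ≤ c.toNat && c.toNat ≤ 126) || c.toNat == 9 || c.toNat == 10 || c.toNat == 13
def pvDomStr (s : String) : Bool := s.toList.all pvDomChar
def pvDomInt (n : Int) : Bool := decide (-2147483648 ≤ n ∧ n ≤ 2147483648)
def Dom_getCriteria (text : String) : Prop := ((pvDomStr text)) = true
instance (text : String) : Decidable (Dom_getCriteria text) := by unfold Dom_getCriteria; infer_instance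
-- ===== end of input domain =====

-- B replaces A's per-character boolean state-machine loop by a staged split/join pipeline
-- (split on '"', join everything after the first piece, rstrip); objective: simpler.

-- ===== PORT A =====
-- A's loop body on state (equals, code); branches in A's order.
def gcBody (st : Bool × List Char) (c : Char) : Bool × List Char :=
  if c = '"' ∧ ¬ st.1 = true then (true, st.2)
  else if st.1 = true ∧ ¬ c = '"' then (st.1, st.2 ++ [c])
  else st

def getCriteria (text : String) : String :=
  let cs := text.toList
  let r := (PySem.List.pyRange 0 (PySem.Str.len text) 1).foldl
      (fun st i => gcBody st (PySem.List.pyGetD cs i ' ')) (false, [])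
  PySem.Str.rstrip (String.ofList r.2)

-- ===== PORT B =====
def getCriteria_alt (text : String) : String :=
  let parts := PySem.Chars.splitOn text.toList ['"']
  PySem.Str.rstrip (String.ofList (PySem.Chars.join [] (PySem.List.slice parts (some 1) none)))

-- ===== PRECONDITION & SPEC =====
def Spec_getCriteria (text : String) (out : String) : Prop := out = getCriteria_alt text
instance (text : String) (out : String) : Decidable (Spec_getCriteria text out) := by unfold Spec_getCriteria; infer_instance

-- ===== CLAIM (what is proved, stated in full; the proofs are below) =====
def Claim_equal_getCriteria : Prop := ∀ (text : String), Dom_getCriteria text → Spec_getCriteria text (getCriteria text)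

-- ===== LEMMAS AND PROOFS =====

-- a forward (non-accumulator) form of splitting on the single character '"'
def sp1 : List Char → List (List Char)
  | [] => [[]]
  | c :: t => if c = '"' then [] :: sp1 t else (sp1 t).modifyHead (c :: ·)

theorem sp1_ne_nil (l : List Char) : sp1 l ≠ [] := by
  cases l with
  | nil => simp [sp1]
  | cons c t =>
    simp only [sp1]
    split_ifs
    · simp
    · exact fun h => (sp1_ne_nil t) (List.modifyHead_eq_nil_iff.mp h)

theorem splitOn_go_eq (fuel : Nat) (l cur : List Char) (acc : List (List Char))
    (h : l.length ≤ fuel) :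
    PySem.Chars.splitOn.go ['"'] fuel l cur acc
      = acc.reverse ++ (sp1 l).modifyHead (cur.reverse ++ ·) := by
  induction fuel generalizing l cur acc with
  | zero =>
    have : l = [] := List.length_eq_zero_iff.mp (Nat.le_zero.mp h)
    subst this
    simp [PySem.Chars.splitOn.go, sp1]
  | succ n ih =>
    cases l with
    | nil => simp [PySem.Chars.splitOn.go, sp1]
    | cons c rest =>
      rw [PySem.Chars.splitOn.go]
      by_cases hc : c = '"'
      · have hp : List.isPrefixOf ['"'] (c :: rest) = true := by
          simp [List.isPrefixOf, hc]
        rw [if_pos hp]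
        have hlen : (List.drop (List.length ['"']) (c :: rest)) = rest := by simp
        rw [hlen, ih rest [] (cur.reverse :: acc) (by simpa using Nat.le_of_succ_le_succ h)]
        simp only [sp1, if_pos hc, List.modifyHead_cons, List.reverse_cons, List.append_assoc,
          List.reverse_nil, List.nil_append, List.singleton_append]
        cases sp1 rest <;> simp
      · have hp : ¬ List.isPrefixOf ['"'] (c :: rest) = true := by
          simp [List.isPrefixOf]
          intro h'; exact hc h'.symm
        rw [if_neg hp, ih rest (c :: cur) acc (by simpa using Nat.le_of_succ_le_succ h)]
        simp only [sp1, if_neg hc]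
        congr 1
        cases sp1 rest <;> simp

theorem splitOn_eq_sp1 (cs : List Char) :
    PySem.Chars.splitOn cs ['"'] = sp1 cs := by
  unfold PySem.Chars.splitOn
  rw [splitOn_go_eq cs.length.succ cs [] [] (Nat.le_succ _)]
  cases h : sp1 cs <;> simp

-- no quote: one single piece, the whole list
theorem sp1_noquote (l : List Char) (h : '"' ∉ l) : sp1 l = [l] := by
  induction l with
  | nil => rfl
  | cons c t ih =>
    have hc : ¬ c = '"' := fun hc => h (hc ▸ List.mem_cons_self)
    simp only [sp1, if_neg hc, ih (fun hm => h (List.mem_cons_of_mem _ hm))]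
    rfl

-- the empty-separator join is flatten
theorem inter_nil : ∀ (parts : List (List Char)), List.intercalate ([] : List Char) parts = parts.flatten
  | [] => rfl
  | [_] => by simp [List.intercalate]
  | x :: y :: t => by
    have ih := inter_nil (y :: t)
    simp only [List.intercalate] at ih ⊢
    have hstep : List.intersperse ([] : List Char) (x :: y :: t)
        = x :: [] :: List.intersperse [] (y :: t) := rfl
    simp [hstep, ih]

-- joining ALL pieces of sp1 removes exactly the quotes
theorem flatten_sp1 (l : List Char) :
    (sp1 l).flatten = l.filter (fun c => ¬ c = '"') := by
  induction l with
  | nil => simp [sp1]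
  | cons c t ih =>
    by_cases hc : c = '"'
    · simp only [sp1, if_pos hc, List.flatten_cons, List.nil_append, ih]
      simp [hc]
    · simp only [sp1, if_neg hc]
      obtain ⟨hd, tl, hspl⟩ := List.exists_cons_of_ne_nil (sp1_ne_nil t)
      rw [hspl]
      rw [hspl] at ih
      simp only [List.modifyHead_cons, List.flatten_cons] at ih ⊢
      simp [hc, ih]

theorem join_sp1 (l : List Char) :
    PySem.Chars.join [] (sp1 l) = l.filter (fun c => ¬ c = '"') := by
  rw [PySem.Chars.join, inter_nil, flatten_sp1]

-- splitting at the first quote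
theorem sp1_split (pre suf : List Char) (hpre : '"' ∉ pre) :
    sp1 (pre ++ '"' :: suf) = pre :: sp1 suf := by
  induction pre with
  | nil => simp [sp1]
  | cons c t ih =>
    have hc : ¬ c = '"' := fun hc => hpre (hc ▸ List.mem_cons_self)
    simp only [List.cons_append, sp1, if_neg hc,
      ih (fun hm => hpre (List.mem_cons_of_mem _ hm))]
    rfl

-- once equals = true, A's loop just appends the non-quote characters
theorem gcLoopA_true (l acc : List Char) :
    l.foldl gcBody (true, acc) = (true, acc ++ l.filter (fun c => ¬ c = '"')) := by
  induction l generalizing acc with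
  | nil => simp
  | cons c t ih =>
    rw [List.foldl_cons]
    by_cases hc : c = '"'
    · have h1 : gcBody (true, acc) c = (true, acc) := by simp [gcBody, hc]
      rw [h1, ih]; simp [hc]
    · have h1 : gcBody (true, acc) c = (true, acc ++ [c]) := by simp [gcBody, hc]
      rw [h1, ih]; simp [hc]

-- before the first quote nothing happens; at the quote the state flips
theorem gcLoopA_false (pre suf : List Char) (hpre : '"' ∉ pre) :
    (pre ++ '"' :: suf).foldl gcBody (false, []) = (true, suf.filter (fun c => ¬ c = '"')) := by
  induction pre with
  | nil =>
    rw [List.nil_append, List.foldl_cons]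
    have h1 : gcBody (false, []) '"' = (true, []) := by simp [gcBody]
    rw [h1, gcLoopA_true]; simp
  | cons c t ih =>
    have hc : ¬ c = '"' := fun hc => hpre (hc ▸ List.mem_cons_self)
    rw [List.cons_append, List.foldl_cons]
    have h1 : gcBody (false, []) c = (false, []) := by simp [gcBody, hc]
    rw [h1]; exact ih (fun hm => hpre (List.mem_cons_of_mem _ hm))

-- no quote at all: A's loop returns the initial state
theorem gcLoopA_noquote (l : List Char) (h : '"' ∉ l) :
    l.foldl gcBody (false, []) = (false, []) := by
  induction l with
  | nil => rfl
  | cons c t ih =>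
    have hc : ¬ c = '"' := fun hc => h (hc ▸ List.mem_cons_self)
    rw [List.foldl_cons]
    have h1 : gcBody (false, []) c = (false, []) := by simp [gcBody, hc]
    rw [h1]; exact ih (fun hm => h (List.mem_cons_of_mem _ hm))

-- split a list at its first quote
theorem gcSplit (l : List Char) (h : '"' ∈ l) :
    ∃ pre suf, l = pre ++ '"' :: suf ∧ '"' ∉ pre := by
  induction l with
  | nil => simp at h
  | cons c t ih =>
    by_cases hc : c = '"'
    · exact ⟨[], t, by simp [hc], by simp⟩
    · have h' : '"' ∈ t := by
        rcases List.mem_cons.mp h with h1 | h1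
        · exact absurd h1.symm hc
        · exact h1
      obtain ⟨pre, suf, heq, hpre⟩ := ih h'
      refine ⟨c :: pre, suf, by simp [heq], ?_⟩
      intro hm
      rcases List.mem_cons.mp hm with h1 | h1
      · exact hc h1.symm
      · exact hpre h1

-- ===== VERDICT (by name: the statement is the Claim_ definition above) =====
theorem getCriteria_spec : Claim_equal_getCriteria := by
  intro text _
  unfold Spec_getCriteria getCriteria getCriteria_alt
  simp only [PySem.Str.len_eq]
  rw [PySem.List.foldl_pyRange_zero_pyGetD' text.toList ' ' gcBody (false, [])]
  rw [splitOn_eq_sp1]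
  by_cases h : '"' ∈ text.toList
  · obtain ⟨pre, suf, heq, hpre⟩ := gcSplit text.toList h
    rw [heq, gcLoopA_false pre suf hpre, sp1_split pre suf hpre]
    have hslice : PySem.List.slice (pre :: sp1 suf) (some (1 : Int)) none = sp1 suf := by
      have h1 : ((1 : Int)) = ((1 : Nat) : Int) := rfl
      rw [h1, PySem.List.slice_from_natCast]
      rfl
    rw [hslice, join_sp1]
  · rw [gcLoopA_noquote _ h, sp1_noquote _ h]
    have hslice : PySem.List.slice [text.toList] (some (1 : Int)) none = [] := by
      have h1 : ((1 : Int)) = ((1 : Nat) : Int) := rfl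
      rw [h1, PySem.List.slice_from_natCast]
      rfl
    rw [hslice]
    rfl
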